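-- pv_equiv track=rewrite | github.com/Morph-Studio-MyBrainHealth/anonymizer | anonymizer.py | determine_pii_type_from_key
-- ===== SOURCE A (Python) =====
-- def determine_pii_type_from_key(key):
--     """
--     Determine the PII type based on the key name.
--     Enhanced with more specific mappings including cognitive assessments and brain scans.
--     """
--     key_lower = key.lower()
--
--     # Check for brain imaging first
--     if any(x in key_lower for x in ['ct_scan', 'mri_scan', 'pet_scan', 'brain_scan', 'imaging', 'radiology']):
--         return 'BRAIN_SCAN_RESULT'
--
--     # Neuropsychiatric inventory
--     elif any(x in key_lower for x in ['neuropsychiatric', 'inventory', 'npi']):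
--         return 'NEUROPSYCH_SCORE'
--
--     # Caregiver distress
--     elif 'caregiver_distress' in key_lower or ('caregiver' in key_lower and 'distress' in key_lower):
--         return 'CAREGIVER_SCORE'
--
--     # Family history
--     elif any(x in key_lower for x in ['family_history', 'father', 'mother', 'parent']):
--         return 'FAMILY_HISTORY'
--
--     # Employment and occupation
--     elif any(x in key_lower for x in ['employment', 'employment_status', 'occupation', 'previous_occupation']):
--         return 'OCCUPATION'
--
--     # Clinical observations
--     elif any(x in key_lower for x in ['clinical_observation', 'observation']):
--         return 'CLINICAL_OBSERVATION'
--
--     # Lumbar puncture and procedures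
--     elif any(x in key_lower for x in ['lumbar_puncture', 'procedure']):
--         return 'MEDICAL_PROCEDURE'
--
--     # Symptom duration
--     elif 'symptom_duration' in key_lower or 'duration' in key_lower:
--         return 'DURATION'
--
--     # Caregiving history
--     elif 'caregiving_history' in key_lower or 'caregiving' in key_lower:
--         return 'CAREGIVING_HISTORY'
--
--     # Team discussion
--     elif any(x in key_lower for x in ['team_discussion', 'bhc_team', 'discussion']):
--         return 'CLINICAL_NOTE'
--
--     # Check for cognitive assessment scores
--     elif any(x in key_lower for x in ['aiadl', 'smmse', 'iqcode', 'ace_iii', 'ace-iii', 'moca', 'mmse',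
--                                     'memory', 'fluency', 'language', 'visuospatial', 'attention',
--                                     'orientation', 'total', 'score', 'domain_performance']):
--         return 'COGNITIVE_SCORE'
--     # Check for specific patterns
--     elif any(x in key_lower for x in ['clinic_name', 'hospital', 'facility', 'service', 'center']):
--         return 'ORGANIZATION'
--     elif any(x in key_lower for x in ['provider', 'doctor', 'physician', 'referring', 'clinician',
--                                       'consultant', 'psychiatrist', 'psychologist', 'therapist']):
--         return 'NAME'
--     elif 'name' in key_lower and 'clinic' not in key_lower:  # Just "name" but not "clinic_name"
--         return 'NAME'
--     elif 'role' in key_lower: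
--         return 'JOB_TITLE'
--     elif 'date' in key_lower:
--         return 'DATE'
--     elif any(x in key_lower for x in ['diagnosis', 'condition', 'disorder', 'syndrome',
--                                       'disease', 'illness', 'impairment']):
--         return 'DIAGNOSIS'
--     elif 'challenge' in key_lower and 'cognitive' in key_lower:
--         return 'DIAGNOSIS'  # Cognitive challenges are diagnoses
--     elif 'sleep' in key_lower and 'pattern' in key_lower:
--         return 'SLEEP_PATTERN'
--     elif any(x in key_lower for x in ['anxiety', 'depression', 'delusion', 'hallucination',
--                                       'apathy', 'agitation', 'irritability']):
--         return 'PSYCHIATRIC_SYMPTOM'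
--     elif 'symptom' in key_lower:
--         return 'MEDICAL_CONDITION'
--     elif any(x in key_lower for x in ['activities', 'living', 'laundry', 'shopping',
--                                       'housekeeping', 'communication', 'transportation',
--                                       'food_preparation', 'managing_finances', 'managing_medications']):
--         return 'DAILY_ACTIVITY'
--     elif any(x in key_lower for x in ['phone', 'tel', 'mobile', 'cell']):
--         return 'PHONE_NUMBER'
--     elif 'email' in key_lower:
--         return 'EMAIL'
--     elif 'address' in key_lower:
--         return 'ADDRESS'
--     elif any(x in key_lower for x in ['ssn', 'social']):
--         return 'SSN'
--     elif any(x in key_lower for x in ['mrn', 'medical_record', 'patient_id']):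
--         return 'MRN'
--     elif 'reason' in key_lower:
--         return 'CLINICAL_NOTE'
--     else:
--         return 'OTHER'
-- ===== SOURCE B (Python) =====
-- # Different algorithm: instead of running one substring scan per pattern inside a
-- # 30-way if/elif chain, B makes a SINGLE left-to-right sweep over the lowered key,
-- # recording at each position every vocabulary token that starts there (startswith),
-- # yielding the complete set of occurring tokens; the label is then a pure decision
-- # over that fact set (first true fact), with no further scanning of the key.
--
-- VOCAB = (
--     'ct_scan', 'mri_scan', 'pet_scan', 'brain_scan', 'imaging', 'radiology',
--     'neuropsychiatric', 'inventory', 'npi',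
--     'caregiver_distress', 'caregiver', 'distress',
--     'family_history', 'father', 'mother', 'parent',
--     'employment', 'employment_status', 'occupation', 'previous_occupation',
--     'clinical_observation', 'observation',
--     'lumbar_puncture', 'procedure',
--     'symptom_duration', 'duration',
--     'caregiving_history', 'caregiving',
--     'team_discussion', 'bhc_team', 'discussion',
--     'aiadl', 'smmse', 'iqcode', 'ace_iii', 'ace-iii', 'moca', 'mmse',
--     'memory', 'fluency', 'language', 'visuospatial', 'attention',
--     'orientation', 'total', 'score', 'domain_performance',
--     'clinic_name', 'hospital', 'facility', 'service', 'center',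
--     'provider', 'doctor', 'physician', 'referring', 'clinician',
--     'consultant', 'psychiatrist', 'psychologist', 'therapist',
--     'name', 'clinic', 'role', 'date',
--     'diagnosis', 'condition', 'disorder', 'syndrome',
--     'disease', 'illness', 'impairment',
--     'challenge', 'cognitive', 'sleep', 'pattern',
--     'anxiety', 'depression', 'delusion', 'hallucination',
--     'apathy', 'agitation', 'irritability',
--     'symptom',
--     'activities', 'living', 'laundry', 'shopping',
--     'housekeeping', 'communication', 'transportation',
--     'food_preparation', 'managing_finances', 'managing_medications',
--     'phone', 'tel', 'mobile', 'cell',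
--     'email', 'address', 'ssn', 'social',
--     'mrn', 'medical_record', 'patient_id', 'reason',
-- )
--
--
-- def determine_pii_type_from_key(key):
--     kl = key.lower()
--     # phase 1: one sweep over the key, collecting every vocabulary token occurring in it
--     found = set()
--     for i in range(len(kl)):
--         for t in VOCAB:
--             if kl.startswith(t, i):
--                 found.add(t)
--     has = found.__contains__
--     # phase 2: pure decision over the fact set (no further scanning of the key)
--     facts = [
--         (has('ct_scan') or has('mri_scan') or has('pet_scan') or has('brain_scan') or has('imaging') or has('radiology'), 'BRAIN_SCAN_RESULT'),
--         (has('neuropsychiatric') or has('inventory') or has('npi'), 'NEUROPSYCH_SCORE'),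
--         (has('caregiver_distress') or (has('caregiver') and has('distress')), 'CAREGIVER_SCORE'),
--         (has('family_history') or has('father') or has('mother') or has('parent'), 'FAMILY_HISTORY'),
--         (has('employment') or has('employment_status') or has('occupation') or has('previous_occupation'), 'OCCUPATION'),
--         (has('clinical_observation') or has('observation'), 'CLINICAL_OBSERVATION'),
--         (has('lumbar_puncture') or has('procedure'), 'MEDICAL_PROCEDURE'),
--         (has('symptom_duration') or has('duration'), 'DURATION'),
--         (has('caregiving_history') or has('caregiving'), 'CAREGIVING_HISTORY'),
--         (has('team_discussion') or has('bhc_team') or has('discussion'), 'CLINICAL_NOTE'),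
--         (has('aiadl') or has('smmse') or has('iqcode') or has('ace_iii') or has('ace-iii') or has('moca') or has('mmse')
--          or has('memory') or has('fluency') or has('language') or has('visuospatial') or has('attention')
--          or has('orientation') or has('total') or has('score') or has('domain_performance'), 'COGNITIVE_SCORE'),
--         (has('clinic_name') or has('hospital') or has('facility') or has('service') or has('center'), 'ORGANIZATION'),
--         (has('provider') or has('doctor') or has('physician') or has('referring') or has('clinician')
--          or has('consultant') or has('psychiatrist') or has('psychologist') or has('therapist'), 'NAME'),
--         (has('name') and not has('clinic'), 'NAME'),
--         (has('role'), 'JOB_TITLE'),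
--         (has('date'), 'DATE'),
--         (has('diagnosis') or has('condition') or has('disorder') or has('syndrome')
--          or has('disease') or has('illness') or has('impairment'), 'DIAGNOSIS'),
--         (has('challenge') and has('cognitive'), 'DIAGNOSIS'),
--         (has('sleep') and has('pattern'), 'SLEEP_PATTERN'),
--         (has('anxiety') or has('depression') or has('delusion') or has('hallucination')
--          or has('apathy') or has('agitation') or has('irritability'), 'PSYCHIATRIC_SYMPTOM'),
--         (has('symptom'), 'MEDICAL_CONDITION'),
--         (has('activities') or has('living') or has('laundry') or has('shopping')
--          or has('housekeeping') or has('communication') or has('transportation')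
--          or has('food_preparation') or has('managing_finances') or has('managing_medications'), 'DAILY_ACTIVITY'),
--         (has('phone') or has('tel') or has('mobile') or has('cell'), 'PHONE_NUMBER'),
--         (has('email'), 'EMAIL'),
--         (has('address'), 'ADDRESS'),
--         (has('ssn') or has('social'), 'SSN'),
--         (has('mrn') or has('medical_record') or has('patient_id'), 'MRN'),
--         (has('reason'), 'CLINICAL_NOTE'),
--     ]
--     labels = [lab for c, lab in facts if c]
--     return labels[0] if labels else 'OTHER'
-- ===== Notes on version B (the rewrite author's own statement) =====
-- stated objective: alternative
-- what changed: Instead of running one substring scan per pattern inside a 30-way if/elif chain, B makes a single left-to-right sweep over the lowered key recording via startswith the complete set of vocabulary tokens occurring in it, then decides the label by a pure pass over a precomputed fact list (first true fact), never rescanning the key.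
import Mathlib
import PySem

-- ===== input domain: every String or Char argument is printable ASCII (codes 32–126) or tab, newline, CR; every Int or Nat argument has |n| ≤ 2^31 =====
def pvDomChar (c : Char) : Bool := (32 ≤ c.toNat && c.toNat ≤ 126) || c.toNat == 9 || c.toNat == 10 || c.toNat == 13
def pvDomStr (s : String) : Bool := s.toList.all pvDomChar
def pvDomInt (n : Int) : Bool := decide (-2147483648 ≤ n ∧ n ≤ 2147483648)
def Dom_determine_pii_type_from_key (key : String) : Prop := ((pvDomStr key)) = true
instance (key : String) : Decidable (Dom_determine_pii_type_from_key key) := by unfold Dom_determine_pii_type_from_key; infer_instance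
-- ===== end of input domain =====

-- B replaces A's 30-way if/elif chain of per-pattern substring scans by a single
-- left-to-right sweep over the key collecting the set of occurring vocabulary tokens,
-- followed by a pure decision over that fact set (objective: alternative algorithm).

-- ===== PORT A =====
def determine_pii_type_from_key (key : String) : String :=
  let key_lower := PySem.Str.lower key
  if (["ct_scan", "mri_scan", "pet_scan", "brain_scan", "imaging", "radiology"].any
      fun x => PySem.Str.isIn x key_lower) then "BRAIN_SCAN_RESULT"
  else if (["neuropsychiatric", "inventory", "npi"].any
      fun x => PySem.Str.isIn x key_lower) then "NEUROPSYCH_SCORE"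
  else if (PySem.Str.isIn "caregiver_distress" key_lower ||
      (PySem.Str.isIn "caregiver" key_lower && PySem.Str.isIn "distress" key_lower)) then "CAREGIVER_SCORE"
  else if (["family_history", "father", "mother", "parent"].any
      fun x => PySem.Str.isIn x key_lower) then "FAMILY_HISTORY"
  else if (["employment", "employment_status", "occupation", "previous_occupation"].any
      fun x => PySem.Str.isIn x key_lower) then "OCCUPATION"
  else if (["clinical_observation", "observation"].any
      fun x => PySem.Str.isIn x key_lower) then "CLINICAL_OBSERVATION"
  else if (["lumbar_puncture", "procedure"].any
      fun x => PySem.Str.isIn x key_lower) then "MEDICAL_PROCEDURE"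
  else if (PySem.Str.isIn "symptom_duration" key_lower ||
      PySem.Str.isIn "duration" key_lower) then "DURATION"
  else if (PySem.Str.isIn "caregiving_history" key_lower ||
      PySem.Str.isIn "caregiving" key_lower) then "CAREGIVING_HISTORY"
  else if (["team_discussion", "bhc_team", "discussion"].any
      fun x => PySem.Str.isIn x key_lower) then "CLINICAL_NOTE"
  else if (["aiadl", "smmse", "iqcode", "ace_iii", "ace-iii", "moca", "mmse",
            "memory", "fluency", "language", "visuospatial", "attention",
            "orientation", "total", "score", "domain_performance"].any
      fun x => PySem.Str.isIn x key_lower) then "COGNITIVE_SCORE"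
  else if (["clinic_name", "hospital", "facility", "service", "center"].any
      fun x => PySem.Str.isIn x key_lower) then "ORGANIZATION"
  else if (["provider", "doctor", "physician", "referring", "clinician",
            "consultant", "psychiatrist", "psychologist", "therapist"].any
      fun x => PySem.Str.isIn x key_lower) then "NAME"
  else if (PySem.Str.isIn "name" key_lower && !(PySem.Str.isIn "clinic" key_lower)) then "NAME"
  else if (PySem.Str.isIn "role" key_lower) then "JOB_TITLE"
  else if (PySem.Str.isIn "date" key_lower) then "DATE"
  else if (["diagnosis", "condition", "disorder", "syndrome",
            "disease", "illness", "impairment"].any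
      fun x => PySem.Str.isIn x key_lower) then "DIAGNOSIS"
  else if (PySem.Str.isIn "challenge" key_lower && PySem.Str.isIn "cognitive" key_lower) then "DIAGNOSIS"
  else if (PySem.Str.isIn "sleep" key_lower && PySem.Str.isIn "pattern" key_lower) then "SLEEP_PATTERN"
  else if (["anxiety", "depression", "delusion", "hallucination",
            "apathy", "agitation", "irritability"].any
      fun x => PySem.Str.isIn x key_lower) then "PSYCHIATRIC_SYMPTOM"
  else if (PySem.Str.isIn "symptom" key_lower) then "MEDICAL_CONDITION"
  else if (["activities", "living", "laundry", "shopping",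
            "housekeeping", "communication", "transportation",
            "food_preparation", "managing_finances", "managing_medications"].any
      fun x => PySem.Str.isIn x key_lower) then "DAILY_ACTIVITY"
  else if (["phone", "tel", "mobile", "cell"].any
      fun x => PySem.Str.isIn x key_lower) then "PHONE_NUMBER"
  else if (PySem.Str.isIn "email" key_lower) then "EMAIL"
  else if (PySem.Str.isIn "address" key_lower) then "ADDRESS"
  else if (["ssn", "social"].any
      fun x => PySem.Str.isIn x key_lower) then "SSN"
  else if (["mrn", "medical_record", "patient_id"].any
      fun x => PySem.Str.isIn x key_lower) then "MRN"
  else if (PySem.Str.isIn "reason" key_lower) then "CLINICAL_NOTE"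
  else "OTHER"

-- ===== PORT B =====
-- the token vocabulary (Source B's VOCAB)
def pvVocab : List String :=
  ["ct_scan",
   "mri_scan",
   "pet_scan",
   "brain_scan",
   "imaging",
   "radiology",
   "neuropsychiatric",
   "inventory",
   "npi",
   "caregiver_distress",
   "caregiver",
   "distress",
   "family_history",
   "father",
   "mother",
   "parent",
   "employment",
   "employment_status",
   "occupation",
   "previous_occupation",
   "clinical_observation",
   "observation",
   "lumbar_puncture",
   "procedure",
   "symptom_duration",
   "duration",
   "caregiving_history",
   "caregiving",
   "team_discussion",
   "bhc_team",
   "discussion",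
   "aiadl",
   "smmse",
   "iqcode",
   "ace_iii",
   "ace-iii",
   "moca",
   "mmse",
   "memory",
   "fluency",
   "language",
   "visuospatial",
   "attention",
   "orientation",
   "total",
   "score",
   "domain_performance",
   "clinic_name",
   "hospital",
   "facility",
   "service",
   "center",
   "provider",
   "doctor",
   "physician",
   "referring",
   "clinician",
   "consultant",
   "psychiatrist",
   "psychologist",
   "therapist",
   "name",
   "clinic",
   "role",
   "date",
   "diagnosis",
   "condition",
   "disorder",
   "syndrome",
   "disease",
   "illness",
   "impairment",
   "challenge",
   "cognitive",
   "sleep",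
   "pattern",
   "anxiety",
   "depression",
   "delusion",
   "hallucination",
   "apathy",
   "agitation",
   "irritability",
   "symptom",
   "activities",
   "living",
   "laundry",
   "shopping",
   "housekeeping",
   "communication",
   "transportation",
   "food_preparation",
   "managing_finances",
   "managing_medications",
   "phone",
   "tel",
   "mobile",
   "cell",
   "email",
   "address",
   "ssn",
   "social",
   "mrn",
   "medical_record",
   "patient_id",
   "reason"]

-- at one position (the suffix starting there), record every token starting there
def pvScanStep (suf : List Char) (found : PySem.Set String) : PySem.Set String :=
  pvVocab.foldl (fun f t => if t.toList.isPrefixOf suf then PySem.Set.add f t else f) found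

-- the single sweep over the key: one step per position (Source B's `for i in range(len(kl))`)
def pvScan : List Char → PySem.Set String → PySem.Set String
  | [], found => found
  | c :: rest, found => pvScan rest (pvScanStep (c :: rest) found)

-- phase 2: the fact list, parametrised by the membership oracle `has`
def pvFacts (has : String → Bool) : List (Bool × String) :=
  [ (has "ct_scan" || (has "mri_scan" || (has "pet_scan" || (has "brain_scan" || (has "imaging" || (has "radiology"))))), "BRAIN_SCAN_RESULT"),
    (has "neuropsychiatric" || (has "inventory" || (has "npi")), "NEUROPSYCH_SCORE"),
    ((has "caregiver_distress" || (has "caregiver" && has "distress")), "CAREGIVER_SCORE"),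
    (has "family_history" || (has "father" || (has "mother" || (has "parent"))), "FAMILY_HISTORY"),
    (has "employment" || (has "employment_status" || (has "occupation" || (has "previous_occupation"))), "OCCUPATION"),
    (has "clinical_observation" || (has "observation"), "CLINICAL_OBSERVATION"),
    (has "lumbar_puncture" || (has "procedure"), "MEDICAL_PROCEDURE"),
    (has "symptom_duration" || (has "duration"), "DURATION"),
    (has "caregiving_history" || (has "caregiving"), "CAREGIVING_HISTORY"),
    (has "team_discussion" || (has "bhc_team" || (has "discussion")), "CLINICAL_NOTE"),
    (has "aiadl" || (has "smmse" || (has "iqcode" || (has "ace_iii" || (has "ace-iii" || (has "moca" || (has "mmse" || (has "memory" || (has "fluency" || (has "language" || (has "visuospatial" || (has "attention" || (has "orientation" || (has "total" || (has "score" || (has "domain_performance"))))))))))))))), "COGNITIVE_SCORE"),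
    (has "clinic_name" || (has "hospital" || (has "facility" || (has "service" || (has "center")))), "ORGANIZATION"),
    (has "provider" || (has "doctor" || (has "physician" || (has "referring" || (has "clinician" || (has "consultant" || (has "psychiatrist" || (has "psychologist" || (has "therapist")))))))), "NAME"),
    ((has "name" && !has "clinic"), "NAME"),
    (has "role", "JOB_TITLE"),
    (has "date", "DATE"),
    (has "diagnosis" || (has "condition" || (has "disorder" || (has "syndrome" || (has "disease" || (has "illness" || (has "impairment")))))), "DIAGNOSIS"),
    ((has "challenge" && has "cognitive"), "DIAGNOSIS"),
    ((has "sleep" && has "pattern"), "SLEEP_PATTERN"),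
    (has "anxiety" || (has "depression" || (has "delusion" || (has "hallucination" || (has "apathy" || (has "agitation" || (has "irritability")))))), "PSYCHIATRIC_SYMPTOM"),
    (has "symptom", "MEDICAL_CONDITION"),
    (has "activities" || (has "living" || (has "laundry" || (has "shopping" || (has "housekeeping" || (has "communication" || (has "transportation" || (has "food_preparation" || (has "managing_finances" || (has "managing_medications"))))))))), "DAILY_ACTIVITY"),
    (has "phone" || (has "tel" || (has "mobile" || (has "cell"))), "PHONE_NUMBER"),
    (has "email", "EMAIL"),
    (has "address", "ADDRESS"),
    (has "ssn" || (has "social"), "SSN"),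
    (has "mrn" || (has "medical_record" || (has "patient_id")), "MRN"),
    (has "reason", "CLINICAL_NOTE") ]

def determine_pii_type_from_key_alt (key : String) : String :=
  let kl := PySem.Str.lower key
  let found := pvScan kl.toList PySem.Set.empty
  let facts := pvFacts (fun t => PySem.Set.contains found t)
  let labels := (facts.filter (fun p => p.1)).map (fun p => p.2)
  labels.headD "OTHER"   -- `labels[0] if labels else 'OTHER'`

-- ===== PRECONDITION & SPEC =====
def Spec_determine_pii_type_from_key (key : String) (out : String) : Prop := out = determine_pii_type_from_key_alt key
instance (key : String) (out : String) : Decidable (Spec_determine_pii_type_from_key key out) := by unfold Spec_determine_pii_type_from_key; infer_instance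

-- ===== CLAIM =====
def Claim_equal_determine_pii_type_from_key : Prop := ∀ (key : String), Dom_determine_pii_type_from_key key → Spec_determine_pii_type_from_key key (determine_pii_type_from_key key)

-- ===== LEMMAS AND PROOFS =====

theorem pv_mem_foldl_add (L : List String) (p : String → Bool) (f : PySem.Set String) (x : String) :
    x ∈ L.foldl (fun f t => if p t then PySem.Set.add f t else f) f ↔
      x ∈ f ∨ (x ∈ L ∧ p x = true) := by
  induction L generalizing f with
  | nil => simp
  | cons a L ih =>
    simp only [List.foldl_cons]
    rw [ih]
    cases hp : p a with
    | false =>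
      simp only [Bool.false_eq_true, if_false, List.mem_cons]
      constructor
      · rintro (h | h)
        · exact Or.inl h
        · exact Or.inr ⟨Or.inr h.1, h.2⟩
      · rintro (h | ⟨(rfl | hm), hpx⟩)
        · exact Or.inl h
        · rw [hpx] at hp; cases hp
        · exact Or.inr ⟨hm, hpx⟩
    | true =>
      simp only [if_true, PySem.Set.mem_add, List.mem_cons]
      constructor
      · rintro ((h | rfl) | h)
        · exact Or.inl h
        · exact Or.inr ⟨Or.inl rfl, hp⟩
        · exact Or.inr ⟨Or.inr h.1, h.2⟩
      · rintro (h | ⟨(rfl | hm), hpx⟩)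
        · exact Or.inl (Or.inl h)
        · exact Or.inl (Or.inr rfl)
        · exact Or.inr ⟨hm, hpx⟩

theorem pv_mem_scan (hay : List Char) (f : PySem.Set String) (x : String) (hx : x.toList ≠ []) :
    x ∈ pvScan hay f ↔ x ∈ f ∨ (x ∈ pvVocab ∧ PySem.Chars.isIn x.toList hay = true) := by
  induction hay generalizing f with
  | nil =>
    have h0 : PySem.Chars.isIn x.toList [] = false := by
      rw [PySem.Chars.isIn_eq_false_iff]
      simp [hx]
    simp [pvScan, h0]
  | cons c rest ih =>
    have hin : PySem.Chars.isIn x.toList (c :: rest) =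
        (x.toList.isPrefixOf (c :: rest) || PySem.Chars.isIn x.toList rest) := by
      rw [Bool.eq_iff_iff]
      simp [PySem.Chars.isIn_iff_infix, List.infix_cons_iff, List.isPrefixOf_iff_prefix]
    simp only [pvScan, pvScanStep]
    rw [ih, pv_mem_foldl_add, hin]
    constructor
    · rintro ((h | ⟨hm, hpre⟩) | ⟨hm, hi⟩)
      · exact Or.inl h
      · exact Or.inr ⟨hm, by simp [hpre]⟩
      · exact Or.inr ⟨hm, by simp [hi]⟩
    · rintro (h | ⟨hm, hor⟩)
      · exact Or.inl (Or.inl h)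
      · rcases Bool.or_eq_true_iff.mp hor with h | h
        · exact Or.inl (Or.inr ⟨hm, h⟩)
        · exact Or.inr ⟨hm, h⟩

set_option maxRecDepth 4000 in
theorem pv_vocab_nonempty : ∀ t ∈ pvVocab, t.toList ≠ [] := by decide

theorem pv_contains_scan (kl : String) (t : String) (h : t ∈ pvVocab) :
    PySem.Set.contains (pvScan kl.toList PySem.Set.empty) t = PySem.Str.isIn t kl := by
  rw [Bool.eq_iff_iff, PySem.Set.contains_iff,
    pv_mem_scan _ _ _ (pv_vocab_nonempty t h)]
  simp [PySem.Set.empty, h, PySem.Str.isIn_eq]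

theorem pv_facts_eq (key : String) :
    pvFacts (fun t => PySem.Set.contains (pvScan (PySem.Str.lower key).toList PySem.Set.empty) t)
      = pvFacts (fun t => PySem.Str.isIn t (PySem.Str.lower key)) := by
  unfold pvFacts
  beta_reduce
  rw [pv_contains_scan _ "ct_scan" (by decide),
      pv_contains_scan _ "mri_scan" (by decide),
      pv_contains_scan _ "pet_scan" (by decide),
      pv_contains_scan _ "brain_scan" (by decide),
      pv_contains_scan _ "imaging" (by decide),
      pv_contains_scan _ "radiology" (by decide),
      pv_contains_scan _ "neuropsychiatric" (by decide),
      pv_contains_scan _ "inventory" (by decide),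
      pv_contains_scan _ "npi" (by decide),
      pv_contains_scan _ "caregiver_distress" (by decide),
      pv_contains_scan _ "caregiver" (by decide),
      pv_contains_scan _ "distress" (by decide),
      pv_contains_scan _ "family_history" (by decide),
      pv_contains_scan _ "father" (by decide),
      pv_contains_scan _ "mother" (by decide),
      pv_contains_scan _ "parent" (by decide),
      pv_contains_scan _ "employment" (by decide),
      pv_contains_scan _ "employment_status" (by decide),
      pv_contains_scan _ "occupation" (by decide),
      pv_contains_scan _ "previous_occupation" (by decide),
      pv_contains_scan _ "clinical_observation" (by decide),
      pv_contains_scan _ "observation" (by decide),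
      pv_contains_scan _ "lumbar_puncture" (by decide),
      pv_contains_scan _ "procedure" (by decide),
      pv_contains_scan _ "symptom_duration" (by decide),
      pv_contains_scan _ "duration" (by decide),
      pv_contains_scan _ "caregiving_history" (by decide),
      pv_contains_scan _ "caregiving" (by decide),
      pv_contains_scan _ "team_discussion" (by decide),
      pv_contains_scan _ "bhc_team" (by decide),
      pv_contains_scan _ "discussion" (by decide),
      pv_contains_scan _ "aiadl" (by decide),
      pv_contains_scan _ "smmse" (by decide),
      pv_contains_scan _ "iqcode" (by decide),
      pv_contains_scan _ "ace_iii" (by decide),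
      pv_contains_scan _ "ace-iii" (by decide),
      pv_contains_scan _ "moca" (by decide),
      pv_contains_scan _ "mmse" (by decide),
      pv_contains_scan _ "memory" (by decide),
      pv_contains_scan _ "fluency" (by decide),
      pv_contains_scan _ "language" (by decide),
      pv_contains_scan _ "visuospatial" (by decide),
      pv_contains_scan _ "attention" (by decide),
      pv_contains_scan _ "orientation" (by decide),
      pv_contains_scan _ "total" (by decide),
      pv_contains_scan _ "score" (by decide),
      pv_contains_scan _ "domain_performance" (by decide),
      pv_contains_scan _ "clinic_name" (by decide),
      pv_contains_scan _ "hospital" (by decide),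
      pv_contains_scan _ "facility" (by decide),
      pv_contains_scan _ "service" (by decide),
      pv_contains_scan _ "center" (by decide),
      pv_contains_scan _ "provider" (by decide),
      pv_contains_scan _ "doctor" (by decide),
      pv_contains_scan _ "physician" (by decide),
      pv_contains_scan _ "referring" (by decide),
      pv_contains_scan _ "clinician" (by decide),
      pv_contains_scan _ "consultant" (by decide),
      pv_contains_scan _ "psychiatrist" (by decide),
      pv_contains_scan _ "psychologist" (by decide),
      pv_contains_scan _ "therapist" (by decide),
      pv_contains_scan _ "name" (by decide),
      pv_contains_scan _ "clinic" (by decide),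
      pv_contains_scan _ "role" (by decide),
      pv_contains_scan _ "date" (by decide),
      pv_contains_scan _ "diagnosis" (by decide),
      pv_contains_scan _ "condition" (by decide),
      pv_contains_scan _ "disorder" (by decide),
      pv_contains_scan _ "syndrome" (by decide),
      pv_contains_scan _ "disease" (by decide),
      pv_contains_scan _ "illness" (by decide),
      pv_contains_scan _ "impairment" (by decide),
      pv_contains_scan _ "challenge" (by decide),
      pv_contains_scan _ "cognitive" (by decide),
      pv_contains_scan _ "sleep" (by decide),
      pv_contains_scan _ "pattern" (by decide),
      pv_contains_scan _ "anxiety" (by decide),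
      pv_contains_scan _ "depression" (by decide),
      pv_contains_scan _ "delusion" (by decide),
      pv_contains_scan _ "hallucination" (by decide),
      pv_contains_scan _ "apathy" (by decide),
      pv_contains_scan _ "agitation" (by decide),
      pv_contains_scan _ "irritability" (by decide),
      pv_contains_scan _ "symptom" (by decide),
      pv_contains_scan _ "activities" (by decide),
      pv_contains_scan _ "living" (by decide),
      pv_contains_scan _ "laundry" (by decide),
      pv_contains_scan _ "shopping" (by decide),
      pv_contains_scan _ "housekeeping" (by decide),
      pv_contains_scan _ "communication" (by decide),
      pv_contains_scan _ "transportation" (by decide),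
      pv_contains_scan _ "food_preparation" (by decide),
      pv_contains_scan _ "managing_finances" (by decide),
      pv_contains_scan _ "managing_medications" (by decide),
      pv_contains_scan _ "phone" (by decide),
      pv_contains_scan _ "tel" (by decide),
      pv_contains_scan _ "mobile" (by decide),
      pv_contains_scan _ "cell" (by decide),
      pv_contains_scan _ "email" (by decide),
      pv_contains_scan _ "address" (by decide),
      pv_contains_scan _ "ssn" (by decide),
      pv_contains_scan _ "social" (by decide),
      pv_contains_scan _ "mrn" (by decide),
      pv_contains_scan _ "medical_record" (by decide),
      pv_contains_scan _ "patient_id" (by decide),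
      pv_contains_scan _ "reason" (by decide)]

def pvChain : List (Bool × String) → String
  | [] => "OTHER"
  | (b, l) :: rest => if b then l else pvChain rest

theorem pv_head_filter (ps : List (Bool × String)) :
    ((ps.filter (fun p => p.1)).map (fun p => p.2)).headD "OTHER" = pvChain ps := by
  induction ps with
  | nil => rfl
  | cons a rest ih =>
    obtain ⟨b, l⟩ := a
    cases b with
    | false =>
      rw [List.filter_cons_of_neg (by simp), ih]
      rfl
    | true =>
      rw [List.filter_cons_of_pos (by simp)]
      rfl

-- ===== VERDICT =====
set_option maxHeartbeats 1000000 in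
theorem determine_pii_type_from_key_spec : Claim_equal_determine_pii_type_from_key := by
  intro key _
  unfold Spec_determine_pii_type_from_key
  simp only [determine_pii_type_from_key_alt]
  rw [pv_facts_eq, pv_head_filter]
  unfold determine_pii_type_from_key pvFacts pvChain
  simp only [pvChain, List.any_cons, List.any_nil, Bool.or_false]
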